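-- pv_equiv track=rewrite | github.com/maluyckx/IDS-ML | scripts/features/features_numbers.py | get_number_of_unique_domains
-- ===== SOURCE A (Python) =====
-- def get_number_of_unique_domains(aggregated_data):
--     """
--     Getting the number of unique domains queried by each host. For each host, we look at the domains that they query and we make a set of these domains and then we take the length of each host.
--
--     Args:
--         - aggregated_data: a list of dictionaries containing the aggregated data.
--
--     Returns:
--         - number_of_unique_domains: a dictionary containing the number of unique domains queried by each host.
--     """
--
--     number_of_unique_domains = {}
--     for data in aggregated_data:
--         host = data['host']
--         if host in number_of_unique_domains:
--             number_of_unique_domains[host].add(data['domain'])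
--         else:
--             number_of_unique_domains[host] = {data['domain']}
--
--     number_of_unique_domains = {key: len(value) for key, value in number_of_unique_domains.items()}
--
--     return number_of_unique_domains
-- ===== SOURCE B (Python) =====
-- def get_number_of_unique_domains(aggregated_data):
--     # One flat set of (host, domain) pairs kept in first-seen order, then a per-host tally.
--     seen = set()
--     pairs = []
--     for data in aggregated_data:
--         pair = (data['host'], data['domain'])
--         if pair not in seen:
--             seen.add(pair)
--             pairs.append(pair)
--     counts = {}
--     for host, _ in pairs:
--         counts[host] = counts.get(host, 0) + 1
--     return counts
-- ===== Notes on version B (the rewrite author's own statement) =====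
-- stated objective: alternative
-- what changed: B replaces A's dict of per-host domain sets with one flat set of (host, domain) pairs deduplicated in first-seen order, then tallies hosts in a second pass with a plain counting dict.
import Mathlib
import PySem

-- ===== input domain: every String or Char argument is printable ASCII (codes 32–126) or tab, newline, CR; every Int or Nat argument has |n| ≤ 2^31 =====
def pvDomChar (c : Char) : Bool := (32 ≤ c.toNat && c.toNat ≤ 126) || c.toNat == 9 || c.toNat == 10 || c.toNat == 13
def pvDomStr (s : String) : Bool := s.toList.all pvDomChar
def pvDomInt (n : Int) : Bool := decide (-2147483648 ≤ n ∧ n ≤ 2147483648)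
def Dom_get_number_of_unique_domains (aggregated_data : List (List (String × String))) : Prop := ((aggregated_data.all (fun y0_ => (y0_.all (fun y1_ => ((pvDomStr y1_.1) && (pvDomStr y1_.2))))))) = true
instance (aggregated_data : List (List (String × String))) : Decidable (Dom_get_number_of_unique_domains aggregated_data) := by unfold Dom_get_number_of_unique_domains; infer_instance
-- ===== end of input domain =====

-- B keeps one flat set of (host, domain) pairs and tallies hosts, instead of A's dict of per-host domain sets (alternative decomposition, same cost).

-- ===== PORT A =====
-- A: build dict host -> set of domains, then map each set to its size.
-- data['host'] / data['domain'] are Dict lookups; Pre_ guarantees the keys exist, so getD's default is never used.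
def get_number_of_unique_domains (aggregated_data : List (List (String × String))) : List (String × Int) :=
  let m : PySem.Dict String (PySem.Set String) :=
    aggregated_data.foldl (fun m data =>
      let host := (PySem.Dict.mk data).getD "host" ""
      if m.contains host then
        m.modify host [] (fun s => PySem.Set.add s ((PySem.Dict.mk data).getD "domain" ""))
      else
        m.insert host (PySem.Set.ofList [(PySem.Dict.mk data).getD "domain" ""])) PySem.Dict.empty
  m.items.map (fun kv => (kv.1, (kv.2.length : Int)))

-- ===== PORT B =====
-- B: dedup (host, domain) pairs in first-seen order (the seen-set/pairs-list of Source B IS PySem.Set), then count hosts with a plain dict.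
def get_number_of_unique_domains_alt (aggregated_data : List (List (String × String))) : List (String × Int) :=
  let pairs : PySem.Set (String × String) :=
    aggregated_data.foldl (fun acc data =>
      PySem.Set.add acc ((PySem.Dict.mk data).getD "host" "", (PySem.Dict.mk data).getD "domain" "")) PySem.Set.empty
  (pairs.foldl (fun c p => c.insert p.1 (c.getD p.1 0 + 1)) PySem.Dict.empty).items

-- ===== PRECONDITION & SPEC =====
-- Pre_ excludes exactly the inputs where A raises KeyError: some entry lacks a 'host' or 'domain' key.
def Pre_get_number_of_unique_domains (aggregated_data : List (List (String × String))) : Prop :=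
  ∀ data ∈ aggregated_data, "host" ∈ data.map Prod.fst ∧ "domain" ∈ data.map Prod.fst
instance (aggregated_data : List (List (String × String))) : Decidable (Pre_get_number_of_unique_domains aggregated_data) := by unfold Pre_get_number_of_unique_domains; infer_instance
def pvWitness_get_number_of_unique_domains : (List (List (String × String))) :=
  [[("host", "a"), ("domain", "x.com")], [("host", "a"), ("domain", "y.com")], [("host", "b"), ("domain", "x.com")]]

def Spec_get_number_of_unique_domains (aggregated_data : List (List (String × String))) (out : List (String × Int)) : Prop := out = get_number_of_unique_domains_alt aggregated_data
instance (aggregated_data : List (List (String × String))) (out : List (String × Int)) : Decidable (Spec_get_number_of_unique_domains aggregated_data out) := by unfold Spec_get_number_of_unique_domains; infer_instance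

-- ===== CLAIM (what is proved, stated in full; the proofs are below) =====
def Claim_equal_get_number_of_unique_domains : Prop := ∀ (aggregated_data : List (List (String × String))), Dom_get_number_of_unique_domains aggregated_data → Pre_get_number_of_unique_domains aggregated_data → Spec_get_number_of_unique_domains aggregated_data (get_number_of_unique_domains aggregated_data)

-- ===== LEMMAS AND PROOFS =====

-- A's loop step, on the extracted (host, domain) pair
def pvAStep (m : PySem.Dict String (PySem.Set String)) (p : String × String) : PySem.Dict String (PySem.Set String) :=
  if m.contains p.1 then m.modify p.1 [] (fun s => PySem.Set.add s p.2)
  else m.insert p.1 (PySem.Set.ofList [p.2])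

-- the set of domains queried by host h, in first-seen order
def pvF (ps : List (String × String)) (h : String) : PySem.Set String :=
  PySem.Set.ofList ((ps.filter (fun p => p.1 == h)).map Prod.snd)

-- dedup commutes with map under injectivity-on-the-list
lemma pvOfList_map {α β : Type} [BEq α] [LawfulBEq α] [BEq β] [LawfulBEq β] (f : α → β) (l : List α)
    (hinj : ∀ a ∈ l, ∀ b ∈ l, f a = f b → a = b) :
    PySem.Set.ofList (l.map f) = (PySem.Set.ofList l).map f := by
  induction l using List.reverseRecOn with
  | nil => simp [PySem.Set.ofList]
  | append_singleton l a ih =>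
    have hinj' : ∀ a' ∈ l, ∀ b ∈ l, f a' = f b → a' = b := by
      intro x hx y hy; exact hinj x (by simp [hx]) y (by simp [hy])
    rw [List.map_append, List.map_singleton, PySem.Set.ofList_append_singleton,
      PySem.Set.ofList_append_singleton, ih hinj']
    by_cases hmem : a ∈ PySem.Set.ofList l
    · rw [PySem.Set.add_of_mem hmem, PySem.Set.add_of_mem (List.mem_map_of_mem hmem)]
    · rw [PySem.Set.add_of_not_mem hmem, PySem.Set.add_of_not_mem, List.map_append,
        List.map_singleton]
      intro hfa
      rcases List.mem_map.mp hfa with ⟨b, hb, hfb⟩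
      have hbl : b ∈ l := (PySem.Set.mem_ofList l b).mp hb
      have := hinj b (by simp [hbl]) a (by simp) hfb
      exact hmem (this ▸ hb)

-- dedup of an image is insensitive to deduplicating the source first
lemma pvOfList_map_ofList {α β : Type} [BEq α] [LawfulBEq α] [BEq β] [LawfulBEq β] (f : α → β) (l : List α) :
    PySem.Set.ofList ((PySem.Set.ofList l).map f) = PySem.Set.ofList (l.map f) := by
  induction l using List.reverseRecOn with
  | nil => simp [PySem.Set.ofList]
  | append_singleton l a ih =>
    rw [PySem.Set.ofList_append_singleton, List.map_append, List.map_singleton,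
      PySem.Set.ofList_append_singleton]
    by_cases hmem : a ∈ PySem.Set.ofList l
    · rw [PySem.Set.add_of_mem hmem, ih, PySem.Set.add_of_mem]
      exact (PySem.Set.mem_ofList _ _).mpr
        (List.mem_map_of_mem ((PySem.Set.mem_ofList l a).mp hmem))
    · rw [PySem.Set.add_of_not_mem hmem, List.map_append, List.map_singleton,
        PySem.Set.ofList_append_singleton, ih]

-- dedup commutes with filter
lemma pvOfList_filter {α : Type} [BEq α] [LawfulBEq α] (q : α → Bool) (l : List α) :
    (PySem.Set.ofList l).filter q = PySem.Set.ofList (l.filter q) := by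
  induction l using List.reverseRecOn with
  | nil => simp [PySem.Set.ofList]
  | append_singleton l a ih =>
    rw [PySem.Set.ofList_append_singleton, List.filter_append]
    by_cases hq : q a
    · have hfa : List.filter q [a] = [a] := by simp [hq]
      by_cases hmem : a ∈ PySem.Set.ofList l
      · rw [PySem.Set.add_of_mem hmem, ih, hfa, PySem.Set.ofList_append_singleton,
          PySem.Set.add_of_mem]
        rw [PySem.Set.mem_ofList]
        exact List.mem_filter.mpr ⟨(PySem.Set.mem_ofList l a).mp hmem, hq⟩
      · rw [PySem.Set.add_of_not_mem hmem, List.filter_append, hfa, ih,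
          PySem.Set.ofList_append_singleton, PySem.Set.add_of_not_mem]
        intro hmem'
        exact hmem ((PySem.Set.mem_ofList l a).mpr
          (List.mem_filter.mp ((PySem.Set.mem_ofList _ a).mp hmem')).1)
    · have hfa : List.filter q [a] = [] := by simp [hq]
      by_cases hmem : a ∈ PySem.Set.ofList l
      · rw [PySem.Set.add_of_mem hmem, ih, hfa, List.append_nil]
      · rw [PySem.Set.add_of_not_mem hmem, List.filter_append, hfa, List.append_nil, ih,
          List.append_nil]

-- characterisation of A's grouping loop
lemma pvAgroup_items (ps : List (String × String)) :
    (ps.foldl pvAStep PySem.Dict.empty).items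
      = (PySem.Set.ofList (ps.map Prod.fst)).map (fun h => (h, pvF ps h)) := by
  induction ps using List.reverseRecOn with
  | nil => rfl
  | append_singleton ps p ih =>
    have hkeys : (ps.foldl pvAStep PySem.Dict.empty).keys
        = PySem.Set.ofList (ps.map Prod.fst) := by
      simp only [PySem.Dict.keys, ih, List.map_map]
      rw [show ((fun x : String × PySem.Set String => x.1) ∘ fun h => (h, pvF ps h)) = id from
        rfl, List.map_id]
    have hnodup : (ps.foldl pvAStep PySem.Dict.empty).keys.Nodup := by
      rw [hkeys]; exact PySem.Set.nodup_ofList _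
    rw [List.foldl_append, List.foldl_cons, List.foldl_nil]
    by_cases hmem : p.1 ∈ PySem.Set.ofList (ps.map Prod.fst)
    · -- host already present: modify adds the domain to its set
      have hcont : (ps.foldl pvAStep PySem.Dict.empty).contains p.1 = true := by
        rw [PySem.Dict.contains_eq_decide_mem_keys, hkeys]; simpa using hmem
      have hget : (ps.foldl pvAStep PySem.Dict.empty).getD p.1 [] = pvF ps p.1 :=
        PySem.Dict.getD_of_mem_items _ (by rw [ih]; exact List.mem_map_of_mem hmem) hnodup []
      rw [show pvAStep (ps.foldl pvAStep PySem.Dict.empty) p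
            = (ps.foldl pvAStep PySem.Dict.empty).modify p.1 []
                (fun s => PySem.Set.add s p.2) from by simp [pvAStep, hcont]]
      rw [PySem.Dict.modify, hget,
        PySem.Dict.items_insert_of_contains _ _ hcont, ih, List.map_map,
        List.map_append, List.map_singleton, PySem.Set.ofList_append_singleton,
        PySem.Set.add_of_mem hmem]
      refine List.map_congr_left ?_
      intro h hh
      by_cases he : h = p.1
      · subst he
        have hstep : pvF (ps ++ [p]) p.1 = PySem.Set.add (pvF ps p.1) p.2 := by
          unfold pvF
          rw [List.filter_append, show List.filter (fun q => q.1 == p.1) [p] = [p] from by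
            simp, List.map_append, List.map_singleton, PySem.Set.ofList_append_singleton]
        simp [hstep]
      · have : pvF (ps ++ [p]) h = pvF ps h := by
          unfold pvF
          rw [List.filter_append, show List.filter (fun q => q.1 == h) [p] = [] from by
            simp [Ne.symm he], List.append_nil]
        simp [Function.comp_apply, he, this]
    · -- new host: insert a fresh singleton set
      have hcont : (ps.foldl pvAStep PySem.Dict.empty).contains p.1 = false := by
        rw [PySem.Dict.contains_eq_decide_mem_keys, hkeys]; simpa using hmem
      have hfil : List.filter (fun q => q.1 == p.1) ps = [] := by
        rw [List.filter_eq_nil_iff]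
        intro a ha hq
        have : p.1 ∈ List.map Prod.fst ps := by
          rw [← eq_of_beq hq]; exact List.mem_map_of_mem ha
        exact hmem ((PySem.Set.mem_ofList _ _).mpr this)
      rw [show pvAStep (ps.foldl pvAStep PySem.Dict.empty) p
            = (ps.foldl pvAStep PySem.Dict.empty).insert p.1 (PySem.Set.ofList [p.2]) from by
          simp [pvAStep, hcont]]
      rw [PySem.Dict.items_insert_of_not_contains _ _ hcont, ih,
        List.map_append, List.map_singleton, PySem.Set.ofList_append_singleton,
        PySem.Set.add_of_not_mem hmem, List.map_append, List.map_singleton]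
      congr 1
      · refine List.map_congr_left ?_
        intro h hh
        have he : h ≠ p.1 := fun e => hmem (e ▸ hh)
        have : pvF (ps ++ [p]) h = pvF ps h := by
          unfold pvF
          rw [List.filter_append, show List.filter (fun q => q.1 == h) [p] = [] from by
            simp [Ne.symm he], List.append_nil]
        rw [this]
      · have : pvF (ps ++ [p]) p.1 = PySem.Set.ofList [p.2] := by
          unfold pvF
          rw [List.filter_append, hfil, List.nil_append, show
            List.filter (fun q => q.1 == p.1) [p] = [p] from by simp, List.map_singleton]
        rw [this]

-- counting deduplicated pairs of a host = size of that host's domain set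
lemma pvCount_eq (ps : List (String × String)) (h : String) :
    ((PySem.Set.ofList ps).map Prod.fst).count h = (pvF ps h).length := by
  have h1 : ((PySem.Set.ofList ps).map Prod.fst).count h
      = ((PySem.Set.ofList ps).filter (fun p => p.1 == h)).length := by
    rw [List.count_eq_countP, List.countP_map, List.countP_eq_length_filter]
    rfl
  have hinj : ∀ a ∈ ps.filter (fun p => p.1 == h), ∀ b ∈ ps.filter (fun p => p.1 == h),
      a.2 = b.2 → a = b := by
    intro a ha b hb hab
    have ha1 : a.1 = h := eq_of_beq (List.mem_filter.mp ha).2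
    have hb1 : b.1 = h := eq_of_beq (List.mem_filter.mp hb).2
    exact Prod.ext (ha1.trans hb1.symm) hab
  rw [h1, pvOfList_filter]
  unfold pvF
  rw [pvOfList_map Prod.snd _ hinj, List.length_map]

theorem get_number_of_unique_domains_spec : Claim_equal_get_number_of_unique_domains := by
  intro ad _ _
  unfold Spec_get_number_of_unique_domains get_number_of_unique_domains
    get_number_of_unique_domains_alt
  have hA : (ad.foldl (fun m data =>
      let host := (PySem.Dict.mk data).getD "host" ""
      if m.contains host then
        m.modify host [] (fun s => PySem.Set.add s ((PySem.Dict.mk data).getD "domain" ""))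
      else
        m.insert host (PySem.Set.ofList [(PySem.Dict.mk data).getD "domain" ""]))
        PySem.Dict.empty)
      = ((ad.map (fun d => ((PySem.Dict.mk d).getD "host" "",
          (PySem.Dict.mk d).getD "domain" ""))).foldl pvAStep PySem.Dict.empty) := by
    rw [List.foldl_map]
    rfl
  have hPairs : (ad.foldl (fun acc data =>
      PySem.Set.add acc ((PySem.Dict.mk data).getD "host" "",
        (PySem.Dict.mk data).getD "domain" "")) PySem.Set.empty)
      = PySem.Set.ofList (ad.map (fun d => ((PySem.Dict.mk d).getD "host" "",
          (PySem.Dict.mk d).getD "domain" ""))) := by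
    rw [PySem.Set.ofList_eq_foldl, List.foldl_map]
    rfl
  set ps := ad.map (fun d => ((PySem.Dict.mk d).getD "host" "",
    (PySem.Dict.mk d).getD "domain" "")) with hps
  simp only [hA, hPairs]
  have hB : ((PySem.Set.ofList ps).foldl
        (fun c p => c.insert p.1 (c.getD p.1 0 + 1)) PySem.Dict.empty)
      = PySem.Dict.counter ((PySem.Set.ofList ps).map Prod.fst) := by
    rw [← PySem.Dict.foldl_insert_getD_add_one_eq_counter, List.foldl_map]
  rw [hB, PySem.Dict.items_counter, pvAgroup_items, List.map_map,
    pvOfList_map_ofList]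
  refine List.map_congr_left ?_
  intro h _
  simp only [Function.comp_apply]
  rw [pvCount_eq]
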